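-- pv_equiv track=rewrite | github.com/jianningzhuang/CS1010X-Programming_Methodology | Hard Problems/cc.py | adjacent_grid
-- ===== SOURCE A (Python) =====
-- def adjacent_viruses(seq, row, col):
--     count = 0
--     zone = [(1,0), (1,1), (0,1), (0,0), (-1,0), (-1,-1), (0,-1),(1,-1),(-1,1)]
--     for x, y in zone:
--         if (row + x, col + y) in seq:
--             count += 1
--     return count
--
-- def adjacent_grid(seq, height, width):
--     result = ()
--     for i in range(height):
--         row = ()
--         for j in range(width):
--             row += (adjacent_viruses(seq, i, j),)
--         result += (row,)
--     return result
-- ===== SOURCE B (Python) =====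
-- def adjacent_grid(seq, height, width):
--     zone = [(1,0), (1,1), (0,1), (0,0), (-1,0), (-1,-1), (0,-1), (1,-1), (-1,1)]
--     counts = {}
--     for p, q in set(seq):
--         for x, y in zone:
--             cell = (p - x, q - y)
--             counts[cell] = counts.get(cell, 0) + 1
--     return tuple(tuple(counts.get((i, j), 0) for j in range(width)) for i in range(height))
-- ===== Notes on version B (the rewrite author's own statement) =====
-- stated objective: faster
-- what changed: Instead of rescanning the whole virus list 9 times per cell (gather), B scatters: it iterates once over the deduplicated viruses, incrementing a dict counter for each of the 9 cells a virus touches, then reads the grid off the counter.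
import Mathlib
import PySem

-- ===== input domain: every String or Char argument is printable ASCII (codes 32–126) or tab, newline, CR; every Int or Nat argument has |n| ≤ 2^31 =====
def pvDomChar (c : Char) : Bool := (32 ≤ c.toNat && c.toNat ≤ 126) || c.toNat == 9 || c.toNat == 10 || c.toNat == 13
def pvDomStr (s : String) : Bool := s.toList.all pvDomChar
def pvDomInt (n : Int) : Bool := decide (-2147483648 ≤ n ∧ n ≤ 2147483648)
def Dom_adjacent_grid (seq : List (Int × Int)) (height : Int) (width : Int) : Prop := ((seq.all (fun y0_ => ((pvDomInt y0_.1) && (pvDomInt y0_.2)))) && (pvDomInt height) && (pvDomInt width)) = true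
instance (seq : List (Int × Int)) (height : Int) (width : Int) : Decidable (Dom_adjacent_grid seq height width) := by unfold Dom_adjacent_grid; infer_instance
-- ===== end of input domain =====

-- B replaces A's per-cell rescan of the whole virus list (9 membership scans per cell) by a single
-- scatter pass over the deduplicated viruses into a dict counter, then reads the grid off the counter.

-- ===== PORT A =====
def adjacent_viruses (seq : List (Int × Int)) (row : Int) (col : Int) : Int :=
  let zone : List (Int × Int) := [(1,0), (1,1), (0,1), (0,0), (-1,0), (-1,-1), (0,-1), (1,-1), (-1,1)]
  zone.foldl (fun count xy => if (row + xy.1, col + xy.2) ∈ seq then count + 1 else count) 0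

def adjacent_grid (seq : List (Int × Int)) (height : Int) (width : Int) : List (List Int) :=
  (PySem.List.pyRange 0 height 1).foldl (fun result i =>
    result ++ [(PySem.List.pyRange 0 width 1).foldl (fun row j => row ++ [adjacent_viruses seq i j]) []]) []

-- ===== PORT B =====
def adjacent_grid_alt (seq : List (Int × Int)) (height : Int) (width : Int) : List (List Int) :=
  let zone : List (Int × Int) := [(1,0), (1,1), (0,1), (0,0), (-1,0), (-1,-1), (0,-1), (1,-1), (-1,1)]
  let counts : PySem.Dict (Int × Int) Int :=
    (PySem.Set.ofList seq).foldl (fun d pq =>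
      zone.foldl (fun d xy => d.modify (pq.1 - xy.1, pq.2 - xy.2) 0 (· + 1)) d) PySem.Dict.empty
  (PySem.List.pyRange 0 height 1).map (fun i =>
    (PySem.List.pyRange 0 width 1).map (fun j => counts.getD (i, j) 0))

-- ===== PRECONDITION & SPEC =====
def Spec_adjacent_grid (seq : List (Int × Int)) (height : Int) (width : Int) (out : List (List Int)) : Prop := out = adjacent_grid_alt seq height width
instance (seq : List (Int × Int)) (height : Int) (width : Int) (out : List (List Int)) : Decidable (Spec_adjacent_grid seq height width out) := by unfold Spec_adjacent_grid; infer_instance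

-- ===== CLAIM (what is proved, stated in full; the proofs are below) =====
def Claim_equal_adjacent_grid : Prop := ∀ (seq : List (Int × Int)) (height : Int) (width : Int), Dom_adjacent_grid seq height width → Spec_adjacent_grid seq height width (adjacent_grid seq height width)

-- ===== LEMMAS AND PROOFS =====

-- B's nested scatter loop is the flat counting loop over the list of touched cells.
lemma foldl_scatter_flatMap (vs z : List (Int × Int)) (d0 : PySem.Dict (Int × Int) Int) :
    vs.foldl (fun d pq =>
        z.foldl (fun d xy => d.modify (pq.1 - xy.1, pq.2 - xy.2) 0 (· + 1)) d) d0
      = (vs.flatMap (fun pq => z.map (fun xy => (pq.1 - xy.1, pq.2 - xy.2)))).foldl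
          (fun d c => d.modify c 0 (· + 1)) d0 := by
  induction vs generalizing d0 with
  | nil => rfl
  | cons v vs ih =>
      simp only [List.foldl_cons, List.flatMap_cons, List.foldl_append, List.foldl_map]
      exact ih _

-- a 0/1 sum over a nodup list counts membership
lemma sum_map_ite_eq_mem (vs : List (Int × Int)) (t : Int × Int) (hv : vs.Nodup) :
    (vs.map (fun v => if v == t then 1 else 0)).sum = (if t ∈ vs then 1 else 0 : Nat) := by
  induction vs with
  | nil => simp
  | cons v vs ih =>
      rcases List.nodup_cons.mp hv with ⟨hne, hnd⟩
      simp only [List.map_cons, List.sum_cons, ih hnd, List.mem_cons]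
      by_cases h : v = t
      · subst h; simp [hne]
      · have h' : ¬ t = v := fun hh => h hh.symm
        simp [h, h']

-- double counting: summing per-virus offset hits equals counting offsets whose target is a virus
lemma exchange (z vs : List (Int × Int)) (i j : Int) (hv : vs.Nodup) :
    (vs.map (fun v => z.countP (fun xy => v == (i + xy.1, j + xy.2)))).sum
      = z.countP (fun xy => decide ((i + xy.1, j + xy.2) ∈ vs)) := by
  induction z with
  | nil => simp
  | cons xy z ih =>
      simp only [List.countP_cons]
      have : (vs.map (fun v => z.countP (fun a => v == (i + a.1, j + a.2))
                + if v == (i + xy.1, j + xy.2) then 1 else 0)).sum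
          = (vs.map (fun v => z.countP (fun a => v == (i + a.1, j + a.2)))).sum
            + (vs.map (fun v => if v == (i + xy.1, j + xy.2) then 1 else 0)).sum :=
        List.sum_map_add
      rw [this, ih, sum_map_ite_eq_mem vs _ hv]
      by_cases h : (i + xy.1, j + xy.2) ∈ vs <;> simp [h]

-- the value of B's counter at cell (i, j) is A's per-cell count
lemma cell_eq (seq : List (Int × Int)) (i j : Int) :
    adjacent_viruses seq i j
      = (((PySem.Set.ofList seq).foldl (fun d pq =>
            ([(1,0), (1,1), (0,1), (0,0), (-1,0), (-1,-1), (0,-1), (1,-1), (-1,1)] : List (Int × Int)).foldl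
              (fun d xy => d.modify (pq.1 - xy.1, pq.2 - xy.2) 0 (· + 1)) d) PySem.Dict.empty).getD (i, j) 0) := by
  rw [foldl_scatter_flatMap, PySem.Dict.getD_foldl_modify_add_one, List.count_flatMap]
  unfold adjacent_viruses
  rw [PySem.List.foldl_ite_add_one]
  have hinner : ∀ v : Int × Int,
      (List.count (i, j) ∘ fun pq : Int × Int =>
          ([(1,0), (1,1), (0,1), (0,0), (-1,0), (-1,-1), (0,-1), (1,-1), (-1,1)] : List (Int × Int)).map
            (fun xy => (pq.1 - xy.1, pq.2 - xy.2))) v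
        = ([(1,0), (1,1), (0,1), (0,0), (-1,0), (-1,-1), (0,-1), (1,-1), (-1,1)] : List (Int × Int)).countP
            (fun xy => v == (i + xy.1, j + xy.2)) := by
    intro v
    simp only [Function.comp_apply, List.count, List.countP_map]
    refine List.countP_congr (fun xy _ => ?_)
    simp only [Function.comp_apply, beq_iff_eq, Prod.ext_iff]
    constructor <;> (intro h; constructor <;> omega)
  rw [List.map_congr_left (fun v _ => hinner v),
      exchange _ _ i j (PySem.Set.nodup_ofList seq)]
  have : (fun xy : Int × Int => decide ((i + xy.1, j + xy.2) ∈ PySem.Set.ofList seq))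
      = fun xy : Int × Int => decide ((i + xy.1, j + xy.2) ∈ seq) := by
    funext xy; simp [PySem.Set.mem_ofList]
  rw [this]
  simp

-- ===== VERDICT (by name: the statement is the Claim_ definition above) =====
theorem adjacent_grid_spec : Claim_equal_adjacent_grid := by
  intro seq height width _
  show adjacent_grid seq height width = adjacent_grid_alt seq height width
  unfold adjacent_grid adjacent_grid_alt
  simp only [PySem.List.foldl_append_singleton_eq_map, List.nil_append]
  refine List.map_congr_left (fun i _ => ?_)
  refine List.map_congr_left (fun j _ => ?_)
  exact cell_eq seq i j
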